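-- pv_equiv track=rewrite | github.com/cafrii/omega2 | 백준/Silver/10844. 쉬운 계단 수/쉬운 계단 수.py | solve
-- ===== SOURCE A (Python) =====
-- def solve(len):
--     # len: 1~100
--
--     num = [ 0 ] * 10
--     # num[i]는 해당 단계(step)에서 끝자리가 i 로 끝나는 계단수의 개수.
--
--     # step 1: 1 자리 숫자. 0 은 해당 안됨.
--     for k in range(1, 10):
--         num[k] = 1
--
--     # step 2 부터는 이터레이션.
--     for step in range(2, len+1):
--         # len 2)
--         next = [0]*10
--         next[0] = num[1]
--         for k in range(1, 9):
--             next[k] = num[k-1] + num[k+1]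
--         next[9] = num[8]
--         num = next
--
--     # return sum(num)
--     # return int(str(sum(num))[-9:])
--     return sum(num) % 1_000_000_000
-- ===== SOURCE B (Python) =====
-- def _matmul(a, b):
--     return [[sum(a[i][t] * b[t][j] for t in range(10)) for j in range(10)]
--             for i in range(10)]
--
--
-- def _matpow(m, e):
--     # m ** e for a 10x10 integer matrix, by repeated squaring; identity for e <= 0
--     if e <= 0:
--         return [[1 if i == j else 0 for j in range(10)] for i in range(10)]
--     h = _matpow(m, e // 2)
--     h2 = _matmul(h, h)
--     return _matmul(h2, m) if e % 2 else h2
--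
--
-- def solve(len):
--     # adjacency matrix of the digit graph: d can be followed by d-1 / d+1
--     m = [[1 if abs(i - j) == 1 else 0 for j in range(10)] for i in range(10)]
--     p = _matpow(m, len - 1)
--     # stair numbers of length `len` = walks of len-1 steps starting at 1..9
--     return sum(p[d][k] for d in range(1, 10) for k in range(10)) % 1_000_000_000
-- ===== Notes on version B (the rewrite author's own statement) =====
-- stated objective: faster
-- what changed: Replaces the len-step rolling-array DP with binary exponentiation of the 10x10 digit-adjacency matrix, summing the walk counts that start at digits 1..9.
import Mathlib
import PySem

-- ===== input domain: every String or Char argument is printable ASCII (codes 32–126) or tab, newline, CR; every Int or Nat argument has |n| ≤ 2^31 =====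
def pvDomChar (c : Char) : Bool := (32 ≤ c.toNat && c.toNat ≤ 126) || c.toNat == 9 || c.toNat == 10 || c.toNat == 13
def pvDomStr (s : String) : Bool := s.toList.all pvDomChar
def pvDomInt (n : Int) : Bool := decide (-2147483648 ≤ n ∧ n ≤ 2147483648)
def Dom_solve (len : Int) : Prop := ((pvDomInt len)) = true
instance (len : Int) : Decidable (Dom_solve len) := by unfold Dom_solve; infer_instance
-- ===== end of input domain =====

-- B replaces A's len-step rolling-array DP by binary exponentiation of the 10×10
-- digit-adjacency matrix (objective: faster, measured).

-- ===== PORT A =====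
-- body of A's `for step in range(2, len+1)` loop; every list index below is a literal
-- in range of a length-10 list, so the total pyGetD/pySetD forms are exact here
def stepA (num : List Int) : List Int :=
  let next := List.replicate 10 (0 : Int)
  let next := PySem.List.pySetD next 0 (PySem.List.pyGetD num 1 0)
  let next := (PySem.List.pyRange 1 9 1).foldl
    (fun nx k => PySem.List.pySetD nx k
      (PySem.List.pyGetD num (k - 1) 0 + PySem.List.pyGetD num (k + 1) 0)) next
  PySem.List.pySetD next 9 (PySem.List.pyGetD num 8 0)

def solve (len : Int) : Int :=
  let num := List.replicate 10 (0 : Int)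
  let num := (PySem.List.pyRange 1 10 1).foldl (fun nm k => PySem.List.pySetD nm k 1) num
  let num := (PySem.List.pyRange 2 (len + 1) 1).foldl (fun nm _step => stepA nm) num
  PySem.Int.mod num.sum 1000000000

-- ===== PORT B =====
-- p[i][j] for the 10×10 matrices of Source B; indices are always literals 0..9, in range
def idx2 (p : List (List Int)) (i j : Int) : Int :=
  PySem.List.pyGetD (PySem.List.pyGetD p i []) j 0

def matmul (a b : List (List Int)) : List (List Int) :=
  (PySem.List.pyRange 0 10 1).map (fun i =>
    (PySem.List.pyRange 0 10 1).map (fun j =>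
      ((PySem.List.pyRange 0 10 1).map (fun t => idx2 a i t * idx2 b t j)).sum))

def matpow (m : List (List Int)) (e : Int) : List (List Int) :=
  if e ≤ 0 then
    (PySem.List.pyRange 0 10 1).map (fun i =>
      (PySem.List.pyRange 0 10 1).map (fun j => if i = j then (1 : Int) else 0))
  else
    let hm := matpow m (PySem.Int.floordiv e 2)
    let h2 := matmul hm hm
    if PySem.Int.mod e 2 = 0 then h2 else matmul h2 m
termination_by e.toNat
decreasing_by
  rw [PySem.Int.floordiv_eq_ediv_of_pos (by norm_num)]
  omega

def solve_alt (len : Int) : Int :=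
  let m := (PySem.List.pyRange 0 10 1).map (fun i =>
    (PySem.List.pyRange 0 10 1).map (fun j => if (i - j).natAbs = 1 then (1 : Int) else 0))
  let p := matpow m (len - 1)
  PySem.Int.mod
    (((PySem.List.pyRange 1 10 1).flatMap (fun d =>
      (PySem.List.pyRange 0 10 1).map (fun k => idx2 p d k))).sum)
    1000000000

-- ===== PRECONDITION & SPEC =====
def Spec_solve (len : Int) (out : Int) : Prop := out = solve_alt len
instance (len : Int) (out : Int) : Decidable (Spec_solve len out) := by unfold Spec_solve; infer_instance

-- ===== CLAIM (what is proved, stated in full; the proofs are below) =====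
def Claim_equal_solve : Prop := ∀ (len : Int), Dom_solve len → Spec_solve len (solve len)

-- ===== LEMMAS AND PROOFS =====

-- number of stair walks of length n starting at digit k
def g : Nat → Int → Int
  | 0, _ => 1
  | n + 1, k => (if 0 < k then g n (k - 1) else 0) + (if k < 9 then g n (k + 1) else 0)

-- a foldl that ignores the list elements is an iterate
theorem foldl_const_iterate {α β : Type} (f : α → α) (l : List β) (a : α) :
    l.foldl (fun x _ => f x) a = f^[l.length] a := by
  induction l generalizing a with
  | nil => rfl
  | cons x xs ih => simp [List.foldl, ih, Function.iterate_succ_apply]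

theorem stepA_explicit (a0 a1 a2 a3 a4 a5 a6 a7 a8 a9 : Int) :
    stepA [a0, a1, a2, a3, a4, a5, a6, a7, a8, a9] =
      [a1, a0 + a2, a1 + a3, a2 + a4, a3 + a5, a4 + a6, a5 + a7, a6 + a8, a7 + a9, a8] := by
  have hr : PySem.List.pyRange 1 9 1 = [1, 2, 3, 4, 5, 6, 7, 8] := by decide
  unfold stepA
  rw [hr]
  simp only [List.foldl]
  simp [PySem.List.pySetD_of_nonneg, PySem.List.pyGetD_eq_getElem, List.set]

theorem init_fold :
    (PySem.List.pyRange 1 10 1).foldl (fun nm k => PySem.List.pySetD nm k 1)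
      (List.replicate 10 (0 : Int)) = [0, 1, 1, 1, 1, 1, 1, 1, 1, 1] := by decide

-- invariant of A's loop: the sum after n steps, from any state
theorem sum_iter_stepA (n : Nat) (a0 a1 a2 a3 a4 a5 a6 a7 a8 a9 : Int) :
    (stepA^[n] [a0, a1, a2, a3, a4, a5, a6, a7, a8, a9]).sum =
      a0 * g n 0 + a1 * g n 1 + a2 * g n 2 + a3 * g n 3 + a4 * g n 4 +
      a5 * g n 5 + a6 * g n 6 + a7 * g n 7 + a8 * g n 8 + a9 * g n 9 := by
  induction n generalizing a0 a1 a2 a3 a4 a5 a6 a7 a8 a9 with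
  | zero => simp [g]; ring
  | succ n ih =>
    rw [Function.iterate_succ_apply, stepA_explicit, ih]
    simp only [g]
    norm_num
    ring

-- bridge from Source B's list matrices to Mathlib matrices
def tenM (a : List (List Int)) : Matrix (Fin 10) (Fin 10) Int :=
  fun i j => idx2 a (i : Nat) (j : Nat)

theorem getD_map_range10 {α : Type} (f : Int → α) (d : α) (k : Nat) (hk : k < 10) :
    PySem.List.pyGetD ((PySem.List.pyRange 0 10 1).map f) (k : Int) d = f k :=
  PySem.List.pyGetD_map_pyRange f 10 k d hk

theorem tenM_matmul (a b : List (List Int)) : tenM (matmul a b) = tenM a * tenM b := by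
  funext i j
  show idx2 (matmul a b) (i : Nat) (j : Nat) = _
  rw [Matrix.mul_apply]
  unfold matmul idx2
  rw [getD_map_range10 _ [] i.val i.isLt, getD_map_range10 _ 0 j.val j.isLt]
  rw [show PySem.List.pyRange 0 10 1 = [0,1,2,3,4,5,6,7,8,9] from by decide]
  simp [Fin.sum_univ_succ, tenM, idx2, PySem.List.pyGetD_ofNat']

theorem tenM_idlist :
    tenM ((PySem.List.pyRange 0 10 1).map (fun i =>
      (PySem.List.pyRange 0 10 1).map (fun j => if i = j then (1 : Int) else 0))) = 1 := by
  have h : ∀ i j : Fin 10, tenM ((PySem.List.pyRange 0 10 1).map (fun i =>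
      (PySem.List.pyRange 0 10 1).map (fun j => if i = j then (1 : Int) else 0))) i j
      = (1 : Matrix (Fin 10) (Fin 10) Int) i j := by decide
  funext i j
  exact h i j

theorem tenM_matpow_aux (m : List (List Int)) :
    ∀ n : Nat, ∀ e : Int, e.toNat = n → tenM (matpow m e) = (tenM m) ^ n := by
  intro n
  induction n using Nat.strong_induction_on with
  | _ n ih =>
    intro e he
    rw [matpow]
    by_cases h : e ≤ 0
    · have hn : n = 0 := by omega
      simp [h, hn, tenM_idlist]
    · have hfd : PySem.Int.floordiv e 2 = e / 2 := PySem.Int.floordiv_eq_ediv_of_pos (by norm_num)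
      have hmd : PySem.Int.mod e 2 = e % 2 := PySem.Int.mod_eq_emod_of_pos (by norm_num)
      have h2 : (e / 2).toNat = n / 2 := by omega
      have hrec := ih (n / 2) (by omega) (e / 2) h2
      simp only [h, if_false, hfd, hmd]
      by_cases hm2 : e % 2 = 0
      · have hn : n / 2 + n / 2 = n := by omega
        simp [hm2, tenM_matmul, hrec, ← pow_add, hn]
      · have hn : n / 2 + n / 2 + 1 = n := by omega
        simp [hm2, tenM_matmul, hrec, ← pow_add, ← pow_succ, hn]

theorem tenM_matpow (m : List (List Int)) (e : Int) :
    tenM (matpow m e) = (tenM m) ^ e.toNat := tenM_matpow_aux m e.toNat e rfl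

-- the digit-adjacency matrix Source B builds
def adjL : List (List Int) :=
  (PySem.List.pyRange 0 10 1).map (fun i =>
    (PySem.List.pyRange 0 10 1).map (fun j => if (i - j).natAbs = 1 then (1 : Int) else 0))

-- row sums of powers of the adjacency matrix count stair walks
theorem rowsum_pow (n : Nat) : ∀ d : Fin 10,
    (∑ k : Fin 10, ((tenM adjL) ^ n) d k) = g n (d : Nat) := by
  induction n with
  | zero =>
    intro d
    simp [Matrix.one_apply, g]
  | succ n ih =>
    intro d
    have hT : ∀ i j : Fin 10, tenM adjL i j =
        (if (i.val : Int) - j.val = 1 ∨ (j.val : Int) - i.val = 1 then 1 else 0) := by decide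
    calc (∑ k : Fin 10, ((tenM adjL) ^ (n+1)) d k)
        = ∑ k : Fin 10, ∑ t : Fin 10, tenM adjL d t * ((tenM adjL) ^ n) t k := by
          simp [pow_succ', Matrix.mul_apply]
      _ = ∑ t : Fin 10, tenM adjL d t * ∑ k : Fin 10, ((tenM adjL) ^ n) t k := by
          rw [Finset.sum_comm]; simp [Finset.mul_sum]
      _ = ∑ t : Fin 10, tenM adjL d t * g n (t : Nat) := by simp [ih]
      _ = g (n + 1) (d : Nat) := by
          fin_cases d <;> simp [Fin.sum_univ_succ, hT, g]

-- A's result in terms of g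
theorem solve_eq (len : Int) :
    solve len = PySem.Int.mod
      (g (len - 1).toNat 1 + g (len - 1).toNat 2 + g (len - 1).toNat 3 + g (len - 1).toNat 4 +
       g (len - 1).toNat 5 + g (len - 1).toNat 6 + g (len - 1).toNat 7 + g (len - 1).toNat 8 +
       g (len - 1).toNat 9) 1000000000 := by
  simp only [solve]
  rw [init_fold, foldl_const_iterate, PySem.List.length_pyRange_one,
      show (len + 1 - 2) = len - 1 from by ring, sum_iter_stepA]
  congr 1
  ring

theorem row_sum_eq (e : Int) (d : Nat) (hd : d < 10) :
    ((PySem.List.pyRange 0 10 1).map (fun k => idx2 (matpow adjL e) (d : Int) k)).sum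
      = g e.toNat d := by
  have hp : tenM (matpow adjL e) = (tenM adjL) ^ e.toNat := tenM_matpow adjL e
  have hrs := rowsum_pow e.toNat ⟨d, hd⟩
  rw [← hrs, ← hp]
  rw [show PySem.List.pyRange 0 10 1 = [0,1,2,3,4,5,6,7,8,9] from by decide]
  simp [Fin.sum_univ_succ, tenM]

-- B's result in terms of g
theorem solve_alt_eq (len : Int) :
    solve_alt len = PySem.Int.mod
      (g (len - 1).toNat 1 + g (len - 1).toNat 2 + g (len - 1).toNat 3 + g (len - 1).toNat 4 +
       g (len - 1).toNat 5 + g (len - 1).toNat 6 + g (len - 1).toNat 7 + g (len - 1).toNat 8 +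
       g (len - 1).toNat 9) 1000000000 := by
  simp only [solve_alt]
  rw [show ((PySem.List.pyRange 0 10 1).map (fun i =>
    (PySem.List.pyRange 0 10 1).map (fun j => if (i - j).natAbs = 1 then (1 : Int) else 0))) = adjL
    from rfl]
  generalize (len - 1 : Int) = e
  rw [show PySem.List.pyRange 1 10 1 = [1,2,3,4,5,6,7,8,9] from by decide]
  simp only [List.flatMap_cons, List.flatMap_nil, List.append_nil, List.sum_append]
  have h1 := row_sum_eq e 1 (by norm_num); norm_num at h1
  have h2 := row_sum_eq e 2 (by norm_num); norm_num at h2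
  have h3 := row_sum_eq e 3 (by norm_num); norm_num at h3
  have h4 := row_sum_eq e 4 (by norm_num); norm_num at h4
  have h5 := row_sum_eq e 5 (by norm_num); norm_num at h5
  have h6 := row_sum_eq e 6 (by norm_num); norm_num at h6
  have h7 := row_sum_eq e 7 (by norm_num); norm_num at h7
  have h8 := row_sum_eq e 8 (by norm_num); norm_num at h8
  have h9 := row_sum_eq e 9 (by norm_num); norm_num at h9
  rw [h1, h2, h3, h4, h5, h6, h7, h8, h9]
  congr 1
  ring

-- ===== VERDICT (by name: the statement is the Claim_ definition above) =====
theorem solve_spec : Claim_equal_solve := by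
  intro len _
  unfold Spec_solve
  rw [solve_eq, solve_alt_eq]
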